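-- pv_equiv track=rewrite | github.com/wilmurillo-ai/Design-Assistant | .skills/openclaw-skills/skills/leonfjr/opc-contract-manager/scripts/deadline_checker.py | bucket_deadlines
-- ===== SOURCE A (Python) =====
-- def bucket_deadlines(deadlines):
--     """Sort deadlines into urgency buckets."""
--     buckets = {
--         "overdue": [],
--         "next_7_days": [],
--         "next_30_days": [],
--         "next_60_days": [],
--         "next_90_days": [],
--         "beyond_90_days": []
--     }
--
--     for d in deadlines:
--         days = d["days_remaining"]
--         if days < 0:
--             buckets["overdue"].append(d)
--         elif days <= 7:
--             buckets["next_7_days"].append(d)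
--         elif days <= 30:
--             buckets["next_30_days"].append(d)
--         elif days <= 60:
--             buckets["next_60_days"].append(d)
--         elif days <= 90:
--             buckets["next_90_days"].append(d)
--         else:
--             buckets["beyond_90_days"].append(d)
--
--     # Sort each bucket by days remaining
--     for key in buckets:
--         buckets[key].sort(key=lambda x: x["days_remaining"])
--
--     return buckets
-- ===== SOURCE B (Python) =====
-- def bucket_deadlines(deadlines):
--     """Sort deadlines into urgency buckets."""
--     ordered = sorted(deadlines, key=lambda x: x["days_remaining"])
--     return {
--         "overdue":        [d for d in ordered if d["days_remaining"] < 0],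
--         "next_7_days":    [d for d in ordered if 0 <= d["days_remaining"] <= 7],
--         "next_30_days":   [d for d in ordered if 7 < d["days_remaining"] <= 30],
--         "next_60_days":   [d for d in ordered if 30 < d["days_remaining"] <= 60],
--         "next_90_days":   [d for d in ordered if 60 < d["days_remaining"] <= 90],
--         "beyond_90_days": [d for d in ordered if d["days_remaining"] > 90],
--     }
-- ===== Notes on version B (the rewrite author's own statement) =====
-- stated objective: alternative
-- what changed: One global stable sort of the whole input followed by six range-filter comprehensions replaces the mutating if/elif append chain with a separate sort of each bucket.
import Mathlib
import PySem

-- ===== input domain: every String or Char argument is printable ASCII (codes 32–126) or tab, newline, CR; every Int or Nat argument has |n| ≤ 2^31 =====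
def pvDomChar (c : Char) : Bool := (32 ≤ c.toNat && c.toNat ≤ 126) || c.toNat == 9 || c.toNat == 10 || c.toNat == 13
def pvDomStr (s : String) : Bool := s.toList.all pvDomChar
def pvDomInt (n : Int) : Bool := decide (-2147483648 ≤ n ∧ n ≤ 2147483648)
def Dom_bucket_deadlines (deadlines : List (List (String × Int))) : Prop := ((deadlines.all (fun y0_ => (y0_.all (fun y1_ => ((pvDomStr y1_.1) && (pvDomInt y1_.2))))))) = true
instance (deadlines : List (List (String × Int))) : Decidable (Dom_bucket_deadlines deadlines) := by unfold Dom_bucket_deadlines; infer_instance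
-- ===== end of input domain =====

-- B replaces the if/elif append chain with one global stable sort followed by six range-filter
-- comprehensions (no per-bucket sorting); same cost class, different decomposition.

-- d["days_remaining"]: first-match association-list lookup (exact on Pre_, where the key exists)
def pvDays (d : List (String × Int)) : Int :=
  match d.find? (fun p => p.1 == "days_remaining") with
  | some p => p.2
  | none => 0

-- ===== PORT A =====
def bucket_deadlines (deadlines : List (List (String × Int))) : List (String × List (List (String × Int))) :=
  let buckets : PySem.Dict String (List (List (String × Int))) :=
    PySem.Dict.mk [("overdue", []), ("next_7_days", []), ("next_30_days", []),
                   ("next_60_days", []), ("next_90_days", []), ("beyond_90_days", [])]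
  let buckets := deadlines.foldl (fun b d =>
    let days := pvDays d
    if days < 0 then b.modify "overdue" [] (· ++ [d])
    else if days ≤ 7 then b.modify "next_7_days" [] (· ++ [d])
    else if days ≤ 30 then b.modify "next_30_days" [] (· ++ [d])
    else if days ≤ 60 then b.modify "next_60_days" [] (· ++ [d])
    else if days ≤ 90 then b.modify "next_90_days" [] (· ++ [d])
    else b.modify "beyond_90_days" [] (· ++ [d])) buckets
  -- for key in buckets: buckets[key].sort(key=lambda x: x["days_remaining"])
  buckets.items.map (fun kv => (kv.1, PySem.List.sorted kv.2 (fun x => pvDays x)))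

-- ===== PORT B =====
def bucket_deadlines_alt (deadlines : List (List (String × Int))) : List (String × List (List (String × Int))) :=
  let ordered := PySem.List.sorted deadlines (fun x => pvDays x)
  [("overdue",        ordered.filter (fun d => decide (pvDays d < 0))),
   ("next_7_days",    ordered.filter (fun d => decide (0 ≤ pvDays d ∧ pvDays d ≤ 7))),
   ("next_30_days",   ordered.filter (fun d => decide (7 < pvDays d ∧ pvDays d ≤ 30))),
   ("next_60_days",   ordered.filter (fun d => decide (30 < pvDays d ∧ pvDays d ≤ 60))),
   ("next_90_days",   ordered.filter (fun d => decide (60 < pvDays d ∧ pvDays d ≤ 90))),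
   ("beyond_90_days", ordered.filter (fun d => decide (90 < pvDays d)))]

-- ===== PRECONDITION & SPEC =====
-- Pre_ excludes exactly the inputs where some record lacks the "days_remaining" key, on which the Python A raises KeyError.
def Pre_bucket_deadlines (deadlines : List (List (String × Int))) : Prop :=
  (deadlines.all (fun d => d.any (fun p => p.1 == "days_remaining"))) = true
instance (deadlines : List (List (String × Int))) : Decidable (Pre_bucket_deadlines deadlines) := by unfold Pre_bucket_deadlines; infer_instance
def pvWitness_bucket_deadlines : (List (List (String × Int))) := [[("days_remaining", 3)], [("days_remaining", -2), ("id", 7)]]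

def Spec_bucket_deadlines (deadlines : List (List (String × Int))) (out : List (String × List (List (String × Int)))) : Prop := out = bucket_deadlines_alt deadlines
instance (deadlines : List (List (String × Int))) (out : List (String × List (List (String × Int)))) : Decidable (Spec_bucket_deadlines deadlines out) := by unfold Spec_bucket_deadlines; infer_instance

-- ===== CLAIM (what is proved, stated in full; the proofs are below) =====
def Claim_equal_bucket_deadlines : Prop := ∀ (deadlines : List (List (String × Int))), Dom_bucket_deadlines deadlines → Pre_bucket_deadlines deadlines → Spec_bucket_deadlines deadlines (bucket_deadlines deadlines)

-- ===== LEMMAS AND PROOFS =====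

-- insertBy (strict key order) preserves key-sortedness
theorem pv_insertBy_pairwise {α : Type} (key : α → Int) (x : α) (acc : List α)
    (h : acc.Pairwise (fun a b => key a ≤ key b)) :
    (PySem.List.insertBy (fun a b => decide (key a < key b)) x acc).Pairwise (fun a b => key a ≤ key b) := by
  induction acc with
  | nil => simp [PySem.List.insertBy]
  | cons y ys ih =>
    rcases List.pairwise_cons.mp h with ⟨hy, hys⟩
    by_cases hb : key x < key y
    · simp only [PySem.List.insertBy, hb, decide_true, if_true]
      refine List.pairwise_cons.mpr ⟨?_, h⟩
      intro z hz
      rcases List.mem_cons.mp hz with rfl | hz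
      · exact le_of_lt hb
      · exact le_trans (le_of_lt hb) (hy z hz)
    · simp only [PySem.List.insertBy, hb, decide_false]
      refine List.pairwise_cons.mpr ⟨?_, ih hys⟩
      intro z hz
      rcases (PySem.List.mem_insertBy _ _ _ _).mp hz with rfl | hzys
      · omega
      · exact hy z hzys

-- filtering commutes with stable insertion into a key-sorted list
theorem pv_filter_insertBy {α : Type} (key : α → Int) (p : α → Bool) (x : α) (acc : List α)
    (h : acc.Pairwise (fun a b => key a ≤ key b)) :
    (PySem.List.insertBy (fun a b => decide (key a < key b)) x acc).filter p =
      if p x then PySem.List.insertBy (fun a b => decide (key a < key b)) x (acc.filter p)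
      else acc.filter p := by
  induction acc with
  | nil => by_cases hp : p x <;> simp [PySem.List.insertBy, hp]
  | cons y ys ih =>
    rcases List.pairwise_cons.mp h with ⟨hy, hys⟩
    by_cases hb : key x < key y
    · -- x goes in front of y; every surviving element of y::ys has key ≥ key y > key x
      simp only [PySem.List.insertBy, hb, decide_true, if_true]
      have hfront : PySem.List.insertBy (fun a b => decide (key a < key b)) x ((y :: ys).filter p)
          = x :: (y :: ys).filter p := by
        cases hc : (y :: ys).filter p with
        | nil => simp [PySem.List.insertBy]
        | cons w rest =>
          have hw : w ∈ (y :: ys).filter p := by rw [hc]; exact List.mem_cons_self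
          have hmem := List.mem_of_mem_filter hw
          have hlt : key x < key w := by
            rcases List.mem_cons.mp hmem with rfl | hmz
            · exact hb
            · exact lt_of_lt_of_le hb (hy w hmz)
          simp [PySem.List.insertBy, hlt]
      by_cases hp : p x
      · rw [if_pos hp, hfront, List.filter_cons, if_pos hp]
      · rw [if_neg hp, List.filter_cons, if_neg (by simp [hp])]
    · simp only [PySem.List.insertBy, hb, decide_false]
      have hins : PySem.List.insertBy (fun a b => decide (key a < key b)) x (y :: ys.filter p)
          = y :: PySem.List.insertBy (fun a b => decide (key a < key b)) x (ys.filter p) := by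
        simp [PySem.List.insertBy, hb]
      by_cases hpy : p y <;> by_cases hp : p x <;>
        simp [List.filter_cons, hpy, hp, ih hys, hins]

-- generalized over the accumulator: filter commutes with the insertion-sort fold
theorem pv_filter_foldl_ins {α : Type} (key : α → Int) (p : α → Bool) (xs acc : List α)
    (h : acc.Pairwise (fun a b => key a ≤ key b)) :
    (xs.foldl (fun acc x => PySem.List.insertBy (fun a b => decide (key a < key b)) x acc) acc).filter p =
      (xs.filter p).foldl (fun acc x => PySem.List.insertBy (fun a b => decide (key a < key b)) x acc) (acc.filter p) := by
  induction xs generalizing acc with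
  | nil => simp
  | cons x xs ih =>
    simp only [List.foldl_cons, List.filter_cons]
    rw [ih _ (pv_insertBy_pairwise key x acc h), pv_filter_insertBy key p x acc h]
    by_cases hp : p x <;> simp [hp]

-- the commuting lemma for Python's stable sort: filter ∘ sorted = sorted ∘ filter
theorem pv_filter_sorted {α : Type} (key : α → Int) (p : α → Bool) (xs : List α) :
    (PySem.List.sorted xs key).filter p = PySem.List.sorted (xs.filter p) key := by
  rw [PySem.List.sorted_eq_foldl_insertBy, PySem.List.sorted_eq_foldl_insertBy]
  simpa using pv_filter_foldl_ins key p xs [] (by simp)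

-- the six chain predicates of A, in order
def pvQ1 (d : List (String × Int)) : Bool := decide (pvDays d < 0)
def pvQ2 (d : List (String × Int)) : Bool := decide (¬ pvDays d < 0 ∧ pvDays d ≤ 7)
def pvQ3 (d : List (String × Int)) : Bool := decide (¬ pvDays d < 0 ∧ ¬ pvDays d ≤ 7 ∧ pvDays d ≤ 30)
def pvQ4 (d : List (String × Int)) : Bool := decide (¬ pvDays d < 0 ∧ ¬ pvDays d ≤ 7 ∧ ¬ pvDays d ≤ 30 ∧ pvDays d ≤ 60)
def pvQ5 (d : List (String × Int)) : Bool := decide (¬ pvDays d < 0 ∧ ¬ pvDays d ≤ 7 ∧ ¬ pvDays d ≤ 30 ∧ ¬ pvDays d ≤ 60 ∧ pvDays d ≤ 90)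
def pvQ6 (d : List (String × Int)) : Bool := decide (¬ pvDays d < 0 ∧ ¬ pvDays d ≤ 7 ∧ ¬ pvDays d ≤ 30 ∧ ¬ pvDays d ≤ 60 ∧ ¬ pvDays d ≤ 90)

-- A's bucketing fold, characterized on a literal six-key dict with arbitrary bucket contents
theorem pv_fold_buckets (xs : List (List (String × Int))) (a b c e f g : List (List (String × Int))) :
    xs.foldl (fun bk d =>
        let days := pvDays d
        if days < 0 then bk.modify "overdue" [] (· ++ [d])
        else if days ≤ 7 then bk.modify "next_7_days" [] (· ++ [d])
        else if days ≤ 30 then bk.modify "next_30_days" [] (· ++ [d])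
        else if days ≤ 60 then bk.modify "next_60_days" [] (· ++ [d])
        else if days ≤ 90 then bk.modify "next_90_days" [] (· ++ [d])
        else bk.modify "beyond_90_days" [] (· ++ [d]))
      (PySem.Dict.mk [("overdue", a), ("next_7_days", b), ("next_30_days", c),
                      ("next_60_days", e), ("next_90_days", f), ("beyond_90_days", g)]) =
    PySem.Dict.mk [("overdue", a ++ xs.filter pvQ1), ("next_7_days", b ++ xs.filter pvQ2),
                   ("next_30_days", c ++ xs.filter pvQ3), ("next_60_days", e ++ xs.filter pvQ4),
                   ("next_90_days", f ++ xs.filter pvQ5), ("beyond_90_days", g ++ xs.filter pvQ6)] := by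
  induction xs generalizing a b c e f g with
  | nil => simp
  | cons x xs ih =>
    simp only [List.foldl_cons, List.filter_cons, pvQ1, pvQ2, pvQ3, pvQ4, pvQ5, pvQ6]
    by_cases h1 : pvDays x < 0
    · simp only [h1, if_true]
      rw [show (PySem.Dict.mk [("overdue", a), ("next_7_days", b), ("next_30_days", c),
            ("next_60_days", e), ("next_90_days", f), ("beyond_90_days", g)]).modify "overdue" [] (· ++ [x]) =
          PySem.Dict.mk [("overdue", a ++ [x]), ("next_7_days", b), ("next_30_days", c),
            ("next_60_days", e), ("next_90_days", f), ("beyond_90_days", g)] from by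
          simp [PySem.Dict.modify, PySem.Dict.insert, PySem.Dict.getD, PySem.Dict.get?]]
      rw [ih]
      simp [h1]
    · by_cases h2 : pvDays x ≤ 7
      · simp only [h1, h2, if_true, if_false]
        rw [show (PySem.Dict.mk [("overdue", a), ("next_7_days", b), ("next_30_days", c),
              ("next_60_days", e), ("next_90_days", f), ("beyond_90_days", g)]).modify "next_7_days" [] (· ++ [x]) =
            PySem.Dict.mk [("overdue", a), ("next_7_days", b ++ [x]), ("next_30_days", c),
              ("next_60_days", e), ("next_90_days", f), ("beyond_90_days", g)] from by
            simp [PySem.Dict.modify, PySem.Dict.insert, PySem.Dict.getD, PySem.Dict.get?]]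
        rw [ih]
        simp [h1, h2]
      · by_cases h3 : pvDays x ≤ 30
        · simp only [h1, h2, h3, if_true, if_false]
          rw [show (PySem.Dict.mk [("overdue", a), ("next_7_days", b), ("next_30_days", c),
                ("next_60_days", e), ("next_90_days", f), ("beyond_90_days", g)]).modify "next_30_days" [] (· ++ [x]) =
              PySem.Dict.mk [("overdue", a), ("next_7_days", b), ("next_30_days", c ++ [x]),
                ("next_60_days", e), ("next_90_days", f), ("beyond_90_days", g)] from by
              simp [PySem.Dict.modify, PySem.Dict.insert, PySem.Dict.getD, PySem.Dict.get?]]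
          rw [ih]
          simp [h1, h2, h3]
        · by_cases h4 : pvDays x ≤ 60
          · simp only [h1, h2, h3, h4, if_true, if_false]
            rw [show (PySem.Dict.mk [("overdue", a), ("next_7_days", b), ("next_30_days", c),
                  ("next_60_days", e), ("next_90_days", f), ("beyond_90_days", g)]).modify "next_60_days" [] (· ++ [x]) =
                PySem.Dict.mk [("overdue", a), ("next_7_days", b), ("next_30_days", c),
                  ("next_60_days", e ++ [x]), ("next_90_days", f), ("beyond_90_days", g)] from by
                simp [PySem.Dict.modify, PySem.Dict.insert, PySem.Dict.getD, PySem.Dict.get?]]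
            rw [ih]
            simp [h1, h2, h3, h4]
          · by_cases h5 : pvDays x ≤ 90
            · simp only [h1, h2, h3, h4, h5, if_true, if_false]
              rw [show (PySem.Dict.mk [("overdue", a), ("next_7_days", b), ("next_30_days", c),
                    ("next_60_days", e), ("next_90_days", f), ("beyond_90_days", g)]).modify "next_90_days" [] (· ++ [x]) =
                  PySem.Dict.mk [("overdue", a), ("next_7_days", b), ("next_30_days", c),
                    ("next_60_days", e), ("next_90_days", f ++ [x]), ("beyond_90_days", g)] from by
                  simp [PySem.Dict.modify, PySem.Dict.insert, PySem.Dict.getD, PySem.Dict.get?]]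
              rw [ih]
              simp [h1, h2, h3, h4, h5]
            · simp only [h1, h2, h3, h4, h5, if_false]
              rw [show (PySem.Dict.mk [("overdue", a), ("next_7_days", b), ("next_30_days", c),
                    ("next_60_days", e), ("next_90_days", f), ("beyond_90_days", g)]).modify "beyond_90_days" [] (· ++ [x]) =
                  PySem.Dict.mk [("overdue", a), ("next_7_days", b), ("next_30_days", c),
                    ("next_60_days", e), ("next_90_days", f), ("beyond_90_days", g ++ [x])] from by
                  simp [PySem.Dict.modify, PySem.Dict.insert, PySem.Dict.getD, PySem.Dict.get?]]
              rw [ih]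
              simp [h1, h2, h3, h4, h5]

-- ===== VERDICT (by name: the statement is the Claim_ definition above) =====
theorem bucket_deadlines_spec : Claim_equal_bucket_deadlines := by
  intro deadlines _ _
  show bucket_deadlines deadlines = bucket_deadlines_alt deadlines
  simp only [bucket_deadlines, bucket_deadlines_alt]
  rw [pv_fold_buckets]
  simp only [PySem.Dict.items, List.map_cons, List.map_nil, List.nil_append]
  have e : ∀ (q r : List (String × Int) → Bool), (∀ d, q d = r d) →
      PySem.List.sorted (deadlines.filter q) (fun x => pvDays x) =
        (PySem.List.sorted deadlines (fun x => pvDays x)).filter r := by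
    intro q r hqr
    rw [pv_filter_sorted (fun x => pvDays x) r deadlines,
        List.filter_congr (fun d _ => hqr d)]
  rw [e pvQ1 (fun d => decide (pvDays d < 0)) (fun d => rfl),
      e pvQ2 (fun d => decide (0 ≤ pvDays d ∧ pvDays d ≤ 7))
        (fun d => by simp only [pvQ2, decide_eq_decide]; omega),
      e pvQ3 (fun d => decide (7 < pvDays d ∧ pvDays d ≤ 30))
        (fun d => by simp only [pvQ3, decide_eq_decide]; omega),
      e pvQ4 (fun d => decide (30 < pvDays d ∧ pvDays d ≤ 60))
        (fun d => by simp only [pvQ4, decide_eq_decide]; omega),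
      e pvQ5 (fun d => decide (60 < pvDays d ∧ pvDays d ≤ 90))
        (fun d => by simp only [pvQ5, decide_eq_decide]; omega),
      e pvQ6 (fun d => decide (90 < pvDays d))
        (fun d => by simp only [pvQ6, decide_eq_decide]; omega)]
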